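-- pv_equiv track=rewrite | github.com/RRam2020/Python-Board-Game-Beta | tools/board.py | boardY
-- ===== SOURCE A (Python) =====
-- def boardY(pos):
--     posy = pos
--     if pos < 10:
--         y = 0
--     elif  pos >= 10 and pos <20:
--         y = pos - 10
--     elif  pos >= 20 and pos < 30:
--         y=10
--     elif  pos >= 30 and pos < 40:
--         y=40- pos
--     elif pos >= 40:
--         return boardY(pos-40)
--     else:
--         y=5
--     return y*50
-- ===== SOURCE B (Python) =====
-- def boardY(pos):
--     if pos >= 40:
--         pos %= 40
--     if pos < 10:
--         y = 0
--     elif pos < 20: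
--         y = pos - 10
--     elif pos < 30:
--         y = 10
--     else:
--         y = 40 - pos
--     return y * 50
-- ===== Notes on version B (the rewrite author's own statement) =====
-- stated objective: simpler
-- what changed: Replaced the subtract-40-per-call tail recursion with a single modulo reduction into [0,40), and the redundant two-sided range tests (plus the unreachable y=5 branch) with a flat single-bound conditional chain.
-- crash fix: On positions large enough that the 40-per-call recursion exhausts Python's default recursion limit (around pos >= 39920) A raises RecursionError while B returns the y-pixel of pos mod 40. — e.g. on boardY(1000000): A raises RecursionError, B returns 0
import Mathlib
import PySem

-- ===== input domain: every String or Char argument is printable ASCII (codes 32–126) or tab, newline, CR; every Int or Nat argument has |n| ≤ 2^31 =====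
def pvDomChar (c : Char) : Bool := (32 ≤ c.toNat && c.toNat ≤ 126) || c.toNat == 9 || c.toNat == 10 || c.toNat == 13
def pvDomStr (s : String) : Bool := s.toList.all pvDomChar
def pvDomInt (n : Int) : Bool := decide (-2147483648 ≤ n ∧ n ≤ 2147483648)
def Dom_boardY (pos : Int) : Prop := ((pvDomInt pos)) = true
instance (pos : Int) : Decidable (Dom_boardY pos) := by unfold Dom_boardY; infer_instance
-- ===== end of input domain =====

-- B replaces the subtract-40 tail recursion by one modulo reduction and flattens the
-- two-sided range tests into single-bound branches (objective: simpler).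

-- ===== PORT A =====
def boardY (pos : Int) : Int :=
  if pos < 10 then (0 : Int) * 50
  else if pos ≥ 10 ∧ pos < 20 then (pos - 10) * 50
  else if pos ≥ 20 ∧ pos < 30 then (10 : Int) * 50
  else if pos ≥ 30 ∧ pos < 40 then (40 - pos) * 50
  else if pos ≥ 40 then boardY (pos - 40)
  else (5 : Int) * 50
termination_by pos.toNat
decreasing_by omega

-- ===== PORT B =====
def boardY_alt (pos : Int) : Int :=
  let p := if pos ≥ 40 then PySem.Int.mod pos 40 else pos
  let y := if p < 10 then (0 : Int)
           else if p < 20 then p - 10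
           else if p < 30 then (10 : Int)
           else 40 - p
  y * 50

-- ===== PRECONDITION & SPEC =====
-- Pre_ excludes the large positions on which Python A's 40-per-call recursion exhausts the
-- default recursion limit and raises RecursionError instead of returning (the first raising
-- pos sits at the cutoff up to a few stack frames); B returns there.
def Pre_boardY (pos : Int) : Prop := pos < 39920
instance (pos : Int) : Decidable (Pre_boardY pos) := by unfold Pre_boardY; infer_instance
def pvWitness_boardY : Int := (37)

-- On positions at or beyond the cutoff A raises RecursionError (recursion depth exceeded); B returns the board y-pixel of the reduced position.
def Raises_boardY (pos : Int) : Prop := pos ≥ 39920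
instance (pos : Int) : Decidable (Raises_boardY pos) := by unfold Raises_boardY; infer_instance
def pvRaiseWitness_boardY : Int := (1000000)
def pvRaiseWitnessOut_boardY : Int := 0

def Spec_boardY (pos : Int) (out : Int) : Prop := out = boardY_alt pos
instance (pos : Int) (out : Int) : Decidable (Spec_boardY pos out) := by unfold Spec_boardY; infer_instance

-- ===== CLAIM (what is proved, stated in full; the proofs are below) =====
def Claim_equal_boardY : Prop := ∀ (pos : Int), Dom_boardY pos → Pre_boardY pos → Spec_boardY pos (boardY pos)
def Claim_raises_boardY : Prop := (∀ (pos : Int), Dom_boardY pos → Raises_boardY pos → ¬ Pre_boardY pos) ∧ (Dom_boardY (pvRaiseWitness_boardY) ∧ Raises_boardY (pvRaiseWitness_boardY) ∧ boardY_alt (pvRaiseWitness_boardY) = pvRaiseWitnessOut_boardY)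

-- ===== LEMMAS AND PROOFS =====

theorem alt_lt40 (pos : Int) (h : pos < 40) :
    boardY_alt pos =
      (if pos < 10 then (0 : Int) else if pos < 20 then pos - 10
       else if pos < 30 then (10 : Int) else 40 - pos) * 50 := by
  simp [boardY_alt, not_le.mpr h]

theorem alt_shift (pos : Int) (h : 40 ≤ pos) :
    boardY_alt (pos - 40) = boardY_alt pos := by
  have hm : PySem.Int.mod pos 40 = pos % 40 :=
    PySem.Int.mod_eq_emod_of_pos (by omega)
  by_cases h' : 40 ≤ pos - 40
  · have hm' : PySem.Int.mod (pos - 40) 40 = (pos - 40) % 40 :=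
      PySem.Int.mod_eq_emod_of_pos (by omega)
    simp only [boardY_alt, if_pos (show pos - 40 ≥ 40 from h'), if_pos (show pos ≥ 40 from h),
      hm, hm']
    have : (pos - 40) % 40 = pos % 40 := by omega
    rw [this]
  · have hlt : pos - 40 < 40 := by omega
    have : pos % 40 = pos - 40 := by omega
    simp only [boardY_alt, if_neg (show ¬ pos - 40 ≥ 40 by omega), if_pos (show pos ≥ 40 from h),
      hm, this]

theorem boardY_eq_aux : ∀ (n : Nat) (pos : Int), pos.toNat = n → boardY pos = boardY_alt pos := by
  intro n
  induction n using Nat.strong_induction_on with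
  | _ n ih =>
    intro pos hn
    rw [boardY]
    by_cases h40 : pos < 40
    · rw [alt_lt40 pos h40]
      split_ifs with h1 h2 h3 h4 h5 h6 h7 h8 h9 <;> omega
    · rw [if_neg (by omega), if_neg (by omega), if_neg (by omega), if_neg (by omega),
        if_pos (by omega)]
      rw [← alt_shift pos (by omega)]
      exact ih (pos - 40).toNat (by omega) _ rfl

-- ===== VERDICT (by name: the statement is the Claim_ definition above) =====
theorem boardY_raises : Claim_raises_boardY := by
  unfold Claim_raises_boardY
  exact ⟨fun pos _ h hp => by unfold Raises_boardY at h; unfold Pre_boardY at hp; omega,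
    by decide⟩

theorem boardY_spec : Claim_equal_boardY := by
  intro pos hdom hpre
  -- sanity: pos is outside the region boardY_raises is about (Pre_ and Raises_ are disjoint)
  have _ : ¬ Raises_boardY pos := fun hr => boardY_raises.1 pos hdom hr hpre
  exact boardY_eq_aux pos.toNat pos rfl
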